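-- pv_equiv track=rewrite | github.com/IBN5101/EXPx-AoC2023 | day02/day02p1.py | solve
-- ===== SOURCE A (Python) =====
-- def solve(game_list: list, ball_bag: list):
--     result = 0
--
--     for i, game in enumerate(game_list):
--         game_possible = True
--         for turn in game:
--             for color_ball in turn:
--                 ball_num, ball_color = color_ball
--                 if ball_num > ball_bag[ball_color]:
--                     game_possible = False
--                     break
--             if not game_possible:
--                 break
--
--         if game_possible:
--             result += i + 1
--
--     return result
-- ===== SOURCE B (Python) =====
-- def solve(game_list: list, ball_bag: list):
--     result = 0
--     for i, game in enumerate(game_list):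
--         # phase 1: aggregate the maximum requested number per color
--         need = {}
--         for turn in game:
--             for num, color in turn:
--                 if color not in need or num > need[color]:
--                     need[color] = num
--         # phase 2: the game is possible iff every requested color is in the bag
--         # and its maximum requested count fits
--         if all(c in ball_bag and n <= ball_bag[c] for c, n in need.items()):
--             result += i + 1
--     return result
-- ===== Notes on version B (the rewrite author's own statement) =====
-- stated objective: alternative
-- what changed: Replaces A's single interleaved scan with break/flag control by a two-phase pass per game: first build a dict of the maximum requested count per color, then check that table against the bag (a color absent from the bag makes the game impossible).
import Mathlib
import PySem

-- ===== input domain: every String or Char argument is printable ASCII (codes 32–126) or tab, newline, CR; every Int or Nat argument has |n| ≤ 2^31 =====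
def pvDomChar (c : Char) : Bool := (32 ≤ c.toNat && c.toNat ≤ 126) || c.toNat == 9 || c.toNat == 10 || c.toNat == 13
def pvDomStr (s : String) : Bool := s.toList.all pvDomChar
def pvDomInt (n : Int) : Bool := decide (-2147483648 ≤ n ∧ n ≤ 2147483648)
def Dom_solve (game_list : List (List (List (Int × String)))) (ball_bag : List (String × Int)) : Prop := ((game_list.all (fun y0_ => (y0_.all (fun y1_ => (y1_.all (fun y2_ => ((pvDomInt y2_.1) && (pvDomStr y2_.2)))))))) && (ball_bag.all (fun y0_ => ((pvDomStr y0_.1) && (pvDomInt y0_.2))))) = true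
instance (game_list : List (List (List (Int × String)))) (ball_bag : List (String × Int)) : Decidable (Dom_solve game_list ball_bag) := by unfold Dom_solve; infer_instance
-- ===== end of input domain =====

-- B replaces A's interleaved scan with break/flag control by a two-phase pass per game
-- (aggregate a per-color maximum table, then compare it with the bag, a missing color making the
-- game impossible): alternative decomposition, same cost. Return-value equivalence on Pre_solve.


-- ===== PORT A =====
-- A's inner ball loop with its break: stops at the first ball that exceeds the bag.
-- ball_bag[color] is a dict lookup; Pre_solve guarantees it is never evaluated at a missing key,
-- so getD 0 is exact there.
def aScanTurn (ball_bag : List (String × Int)) : List (Int × String) → Bool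
  | [] => true
  | (ball_num, ball_color) :: rest =>
    if ball_num > (PySem.Dict.mk ball_bag).getD ball_color 0 then false
    else aScanTurn ball_bag rest

-- A's turn loop: breaks as soon as game_possible became False.
def aScanGame (ball_bag : List (String × Int)) : List (List (Int × String)) → Bool
  | [] => true
  | turn :: rest =>
    if aScanTurn ball_bag turn then aScanGame ball_bag rest else false

def solve (game_list : List (List (List (Int × String)))) (ball_bag : List (String × Int)) : Int :=
  (PySem.List.enumerate game_list).foldl
    (fun result p => if aScanGame ball_bag p.2 then result + (p.1 + 1) else result) 0

-- ===== PORT B =====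
-- phase 1 of Source B: the dict of the maximum requested number per color.
def bNeed (game : List (List (Int × String))) : PySem.Dict String Int :=
  game.foldl (fun need turn =>
    turn.foldl (fun need b =>
      if !(need.contains b.2) || b.1 > need.getD b.2 0 then need.insert b.2 b.1 else need) need)
    PySem.Dict.empty

-- phase 2 of Source B: all(c in ball_bag and n <= ball_bag[c] for c, n in need.items())
def bPossible (ball_bag : List (String × Int)) (game : List (List (Int × String))) : Bool :=
  (bNeed game).items.all
    (fun q => (PySem.Dict.mk ball_bag).contains q.1 && q.2 ≤ (PySem.Dict.mk ball_bag).getD q.1 0)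

def solve_alt (game_list : List (List (List (Int × String)))) (ball_bag : List (String × Int)) : Int :=
  (PySem.List.enumerate game_list).foldl
    (fun result p => if bPossible ball_bag p.2 then result + (p.1 + 1) else result) 0

-- ===== PRECONDITION & SPEC =====
-- a ball A's scan passes without incident: its color is in the bag and its count fits
def pvGood (ball_bag : List (String × Int)) (b : Int × String) : Bool :=
  (PySem.Dict.mk ball_bag).contains b.2 && b.1 ≤ (PySem.Dict.mk ball_bag).getD b.2 0
-- Pre_solve excludes exactly the inputs on which A raises KeyError: those where some game's first
-- not-passing ball (in scan order) has a color missing from the bag, so the lookup raises before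
-- any break (B returns a value there, counting such games as impossible).  On every input A
-- returns on, Pre_solve holds.
def Pre_solve (game_list : List (List (List (Int × String)))) (ball_bag : List (String × Int)) : Prop :=
  (game_list.all (fun g =>
    match g.flatten.dropWhile (pvGood ball_bag) with
    | [] => true
    | b :: _ => (PySem.Dict.mk ball_bag).contains b.2)) = true
instance (game_list : List (List (List (Int × String)))) (ball_bag : List (String × Int)) : Decidable (Pre_solve game_list ball_bag) := by unfold Pre_solve; infer_instance
def pvWitness_solve : (List (List (List (Int × String)))) × (List (String × Int)) :=
  ([[[(1, "red"), (3, "blue")], [(2, "red")]], [[(7, "red")]]], [("red", 4), ("blue", 3)])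

def Spec_solve (game_list : List (List (List (Int × String)))) (ball_bag : List (String × Int)) (out : Int) : Prop := out = solve_alt game_list ball_bag
instance (game_list : List (List (List (Int × String)))) (ball_bag : List (String × Int)) (out : Int) : Decidable (Spec_solve game_list ball_bag out) := by unfold Spec_solve; infer_instance

-- ===== CLAIM (what is proved, stated in full; the proofs are below) =====
def Claim_equal_solve : Prop := ∀ (game_list : List (List (List (Int × String)))) (ball_bag : List (String × Int)), Dom_solve game_list ball_bag → Pre_solve game_list ball_bag → Spec_solve game_list ball_bag (solve game_list ball_bag)

-- ===== LEMMAS AND PROOFS =====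

-- what port A's scan actually compares each ball against
def pvFits (ball_bag : List (String × Int)) (b : Int × String) : Bool :=
  decide (b.1 ≤ (PySem.Dict.mk ball_bag).getD b.2 0)

theorem aScanTurn_eq_all (bag : List (String × Int)) (t : List (Int × String)) :
    aScanTurn bag t = t.all (pvFits bag) := by
  induction t with
  | nil => rfl
  | cons b rest ih =>
    obtain ⟨n, c⟩ := b
    simp only [aScanTurn, List.all_cons, ih, pvFits]
    split_ifs with h
    · simp [show ¬ (n ≤ (PySem.Dict.mk bag).getD c 0) from by omega]
    · simp [show n ≤ (PySem.Dict.mk bag).getD c 0 from by omega]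

theorem aScanGame_eq_all (bag : List (String × Int)) (g : List (List (Int × String))) :
    aScanGame bag g = g.flatten.all (pvFits bag) := by
  rw [List.all_flatten]
  induction g with
  | nil => rfl
  | cons t rest ih =>
    simp only [aScanGame, List.all_cons, ih, aScanTurn_eq_all]
    split_ifs with h <;> simp [h]

-- under the per-game precondition, A's fit-only check agrees with the good check
theorem all_fits_eq_all_good (bag : List (String × Int)) (l : List (Int × String))
    (h : (match l.dropWhile (pvGood bag) with
          | [] => true
          | b :: _ => (PySem.Dict.mk bag).contains b.2) = true) :
    l.all (pvFits bag) = l.all (pvGood bag) := by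
  induction l with
  | nil => rfl
  | cons b rest ih =>
    by_cases hg : pvGood bag b = true
    · rw [List.dropWhile_cons_of_pos hg] at h
      have hf : pvFits bag b = true := by
        unfold pvGood at hg; unfold pvFits
        simp only [Bool.and_eq_true] at hg
        exact hg.2
      simp [List.all_cons, hf, hg, ih h]
    · rw [List.dropWhile_cons_of_neg hg] at h
      have hc : (PySem.Dict.mk bag).contains b.2 = true := h
      have hgf : pvGood bag b = pvFits bag b := by
        unfold pvGood pvFits; rw [hc, Bool.true_and]
      have hf : pvFits bag b = false := by
        cases hfv : pvFits bag b
        · rfl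
        · exact absurd (hgf.trans hfv) hg
      simp [List.all_cons, hf, hgf.trans hf]

-- the body of B's phase-1 fold
def bStep (need : PySem.Dict String Int) (b : Int × String) : PySem.Dict String Int :=
  if !(need.contains b.2) || b.1 > need.getD b.2 0 then need.insert b.2 b.1 else need

-- B's table check, stated over keys
def bCheck (bag : List (String × Int)) (d : PySem.Dict String Int) : Bool :=
  d.keys.all (fun k =>
    (PySem.Dict.mk bag).contains k && d.getD k 0 ≤ (PySem.Dict.mk bag).getD k 0)

theorem bStep_nodup (d : PySem.Dict String Int) (b : Int × String) (h : d.keys.Nodup) :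
    (bStep d b).keys.Nodup := by
  unfold bStep; split_ifs with hc
  · exact PySem.Dict.nodup_keys_insert d b.2 b.1 h
  · exact h

theorem bCheck_step (bag : List (String × Int)) (d : PySem.Dict String Int)
    (b : Int × String) :
    bCheck bag (bStep d b) = (bCheck bag d && pvGood bag b) := by
  obtain ⟨n, c⟩ := b
  unfold bStep bCheck pvGood
  by_cases hc : d.contains c
  · have hmem : c ∈ d.keys := (PySem.Dict.contains_iff_mem_keys d c).1 hc
    by_cases hgt : n > d.getD c 0
    · simp only [hc, hgt, decide_true, Bool.not_true, Bool.false_or, if_true]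
      rw [PySem.Dict.keys_insert_of_contains d n hc]
      rw [Bool.eq_iff_iff]
      simp only [Bool.and_eq_true, List.all_eq_true, decide_eq_true_eq]
      constructor
      · intro h
        refine ⟨fun k hk => ⟨(h k hk).1, ?_⟩, (h c hmem).1, ?_⟩
        · have := (h k hk).2
          rw [PySem.Dict.getD_insert] at this
          by_cases hkc : k = c
          · subst hkc; simp at this; omega
          · simpa [hkc] using this
        · have := (h c hmem).2
          rw [PySem.Dict.getD_insert] at this
          simpa using this
      · rintro ⟨h, hcc, hn⟩ k hk
        refine ⟨(h k hk).1, ?_⟩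
        rw [PySem.Dict.getD_insert]
        by_cases hkc : k = c
        · simp [hkc, hn]
        · simpa [hkc] using (h k hk).2
    · have hcond : (!(d.contains c) || decide (n > d.getD c 0)) = false := by
        simp [hc]; omega
      simp only [hcond, Bool.false_eq_true, if_false]
      rw [Bool.eq_iff_iff]
      simp only [Bool.and_eq_true, List.all_eq_true, decide_eq_true_eq]
      constructor
      · intro h
        refine ⟨h, (h c hmem).1, ?_⟩
        have := (h c hmem).2
        omega
      · rintro ⟨h, _, _⟩; exact h
  · have hc' : d.contains c = false := by simpa using hc
    have hnmem : c ∉ d.keys := fun hm => hc ((PySem.Dict.contains_iff_mem_keys d c).2 hm)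
    simp only [hc', Bool.not_false, Bool.true_or, if_true]
    rw [PySem.Dict.keys_insert_of_not_contains d n hc']
    rw [Bool.eq_iff_iff]
    simp only [Bool.and_eq_true, List.all_eq_true, List.mem_append, List.mem_singleton,
      decide_eq_true_eq]
    constructor
    · intro h
      refine ⟨fun k hk => ⟨(h k (Or.inl hk)).1, ?_⟩, (h c (Or.inr rfl)).1, ?_⟩
      · have := (h k (Or.inl hk)).2
        rw [PySem.Dict.getD_insert] at this
        have hkc : k ≠ c := fun he => hnmem (he ▸ hk)
        simpa [hkc] using this
      · have := (h c (Or.inr rfl)).2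
        rw [PySem.Dict.getD_insert] at this
        simpa using this
    · rintro ⟨h, hcc, hn⟩ k hk
      rcases hk with hk | rfl
      · refine ⟨(h k hk).1, ?_⟩
        rw [PySem.Dict.getD_insert]
        have hkc : k ≠ c := fun he => hnmem (he ▸ hk)
        simpa [hkc] using (h k hk).2
      · refine ⟨hcc, ?_⟩
        rw [PySem.Dict.getD_insert]
        simp [hn]

theorem bCheck_foldl (bag : List (String × Int)) (balls : List (Int × String))
    (d : PySem.Dict String Int) (hnd : d.keys.Nodup) :
    bCheck bag (balls.foldl bStep d) = (bCheck bag d && balls.all (pvGood bag)) := by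
  induction balls generalizing d with
  | nil => simp
  | cons b rest ih =>
    rw [List.foldl_cons, ih (bStep d b) (bStep_nodup d b hnd), bCheck_step bag d b,
      List.all_cons, Bool.and_assoc]

theorem bNeed_eq_foldl (g : List (List (Int × String))) :
    bNeed g = (g.flatten).foldl bStep PySem.Dict.empty := by
  unfold bNeed
  rw [List.foldl_flatten]
  rfl

theorem nodup_foldl_bStep (balls : List (Int × String)) (d : PySem.Dict String Int)
    (hnd : d.keys.Nodup) : (balls.foldl bStep d).keys.Nodup := by
  induction balls generalizing d with
  | nil => exact hnd
  | cons b rest ih => exact ih _ (bStep_nodup d b hnd)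

-- phase 2 over items equals the keys formulation, hence the all-balls check
theorem bPossible_eq_all_good (bag : List (String × Int)) (g : List (List (Int × String))) :
    bPossible bag g = g.flatten.all (pvGood bag) := by
  have hnd : (bNeed g).keys.Nodup := by
    rw [bNeed_eq_foldl]
    exact nodup_foldl_bStep _ _ (by simp [PySem.Dict.keys_empty])
  have : bPossible bag g = bCheck bag (bNeed g) := by
    unfold bPossible bCheck
    rw [PySem.Dict.items_eq_map_keys (bNeed g) hnd 0, List.all_map]
    rfl
  rw [this, bNeed_eq_foldl,
    bCheck_foldl bag g.flatten PySem.Dict.empty (by simp [PySem.Dict.keys_empty])]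
  have he : bCheck bag PySem.Dict.empty = true := by
    unfold bCheck; simp [PySem.Dict.keys_empty]
  rw [he, Bool.true_and]

-- the per-game equality under the per-game precondition
theorem game_eq (bag : List (String × Int)) (g : List (List (Int × String)))
    (h : (match g.flatten.dropWhile (pvGood bag) with
          | [] => true
          | b :: _ => (PySem.Dict.mk bag).contains b.2) = true) :
    aScanGame bag g = bPossible bag g := by
  rw [aScanGame_eq_all, bPossible_eq_all_good, all_fits_eq_all_good bag g.flatten h]

theorem mem_enumerate_snd {α : Type} {p : Int × α} {l : List α} {s : Int}
    (h : p ∈ PySem.List.enumerate l s) : p.2 ∈ l := by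
  rcases (PySem.List.mem_enumerate_iff l s p).1 h with ⟨k, hk, rfl⟩
  exact List.getElem_mem hk

-- ===== VERDICT (by name: the statement is the Claim_ definition above) =====
theorem solve_spec : Claim_equal_solve := by
  intro game_list ball_bag _ hpre
  unfold Spec_solve solve solve_alt
  apply PySem.List.foldl_congr_mem
  intro acc p hp
  have hg := mem_enumerate_snd hp
  unfold Pre_solve at hpre
  rw [List.all_eq_true] at hpre
  rw [game_eq ball_bag p.2 (hpre p.2 hg)]
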